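-- pv_equiv track=rewrite | github.com/wherby/code | contest/00000c315d89/c355/q4/t4 copy.py | countPalindromePaths
-- ===== SOURCE A (Python) =====
-- from typing import List, Tuple, Optional
-- from collections import defaultdict,deque
-- from functools import cache
--
-- def countPalindromePaths(parent: List[int], s: str) -> int:
--     n = len(parent)
--     @cache
--     def getVals(idx):
--         if idx ==0:return 0
--         return getVals(parent[idx]) ^(1<< (ord(s[idx])-ord('a')))
--     vals = [getVals(i) for i in range(n)]
--     dic = defaultdict(int)
--     sm = 0
--     for x in vals:
--         sm += dic[x]
--         for i in range(26):
--             sm +=dic[x ^(1<<i)]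
--         dic[x] +=1
--     return sm
-- ===== SOURCE B (Python) =====
-- def countPalindromePaths(parent, s):
--     n = len(parent)
--     vals = []
--     for i in range(n):
--         m = 0
--         j = i
--         while j != 0:
--             m ^= 1 << (ord(s[j]) - ord('a'))
--             j = parent[j]
--         vals.append(m)
--     total = 0
--     for k in range(n):
--         for j in range(k):
--             d = vals[j] ^ vals[k]
--             if d == 0 or any(d == 1 << i for i in range(26)):
--                 total += 1
--     return total
-- ===== Notes on version B (the rewrite author's own statement) =====
-- stated objective: simpler
-- what changed: B replaces A's memoized top-down recursion by a plain per-node walk to the root accumulating the xor mask, and replaces the streaming defaultdict with 27 hash lookups per element by a direct brute-force double loop over index pairs testing whether the two masks are equal or differ in one of the 26 letter bits.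
import Mathlib
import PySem

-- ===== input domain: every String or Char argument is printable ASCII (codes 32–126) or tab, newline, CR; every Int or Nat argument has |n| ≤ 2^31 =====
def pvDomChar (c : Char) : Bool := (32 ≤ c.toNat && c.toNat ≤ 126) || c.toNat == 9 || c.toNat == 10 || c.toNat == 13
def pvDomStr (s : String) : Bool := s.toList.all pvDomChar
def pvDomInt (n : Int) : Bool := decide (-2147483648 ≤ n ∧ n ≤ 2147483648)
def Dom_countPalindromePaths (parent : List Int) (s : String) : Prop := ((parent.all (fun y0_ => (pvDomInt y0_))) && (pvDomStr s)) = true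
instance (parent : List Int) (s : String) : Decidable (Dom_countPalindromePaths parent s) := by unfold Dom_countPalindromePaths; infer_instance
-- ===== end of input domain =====

-- B recomputes each node's mask by an explicit walk to the root (no cache) and counts
-- close pairs by a brute-force double loop over index pairs (no hash map); simpler, not faster.

-- shared helper: 1 << (ord(s[j]) - ord('a'))  (both Pythons compute exactly this expression)
def pvBit (s : List Char) (j : Int) : Nat :=
  1 <<< (((PySem.List.pyGet? s j).getD 'a').toNat - 97)

-- ===== PORT A =====
-- getVals, fueled (Python's recursion is unbounded; on Pre_ every parent chain reaches
-- node 0 within n steps, so fuel n suffices and the defaults below never fire)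
def pvGetValsA (parent : List Int) (s : List Char) : Nat → Int → Nat
  | 0, _ => 0
  | fuel + 1, idx =>
    if idx = 0 then 0
    else pvGetValsA parent s fuel ((PySem.List.pyGet? parent idx).getD 0) ^^^ pvBit s idx

-- one iteration of A's counting loop (defaultdict reads modelled by getD: the zeros a
-- defaultdict read inserts are never observed, only looked up, so the values agree)
def pvStepA (acc : Int × PySem.Dict Nat Int) (x : Nat) : Int × PySem.Dict Nat Int :=
  let sm := acc.1 + acc.2.getD x 0
  let sm := (List.range 26).foldl (fun sm i => sm + acc.2.getD (x ^^^ (1 <<< i)) 0) sm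
  (sm, acc.2.insert x (acc.2.getD x 0 + 1))

def countPalindromePaths (parent : List Int) (s : String) : Int :=
  let n := parent.length
  let vals := (List.range n).map (fun (i : Nat) => pvGetValsA parent s.toList n (i : Int))
  (vals.foldl pvStepA (0, PySem.Dict.empty)).1

-- ===== PORT B =====
-- the while-loop walking j to the root, fueled like A's recursion
def pvWalkB (parent : List Int) (s : List Char) : Nat → Int → Nat → Nat
  | 0, _, m => m
  | fuel + 1, j, m =>
    if j = 0 then m
    else pvWalkB parent s fuel ((PySem.List.pyGet? parent j).getD 0) (m ^^^ pvBit s j)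

-- d == 0 or any(d == 1 << i for i in range(26))
def pvClose (d : Nat) : Bool := d == 0 || (List.range 26).any (fun i => d == 1 <<< i)

def countPalindromePaths_alt (parent : List Int) (s : String) : Int :=
  let n := parent.length
  let vals := (List.range n).map (fun (i : Nat) => pvWalkB parent s.toList n (i : Int) 0)
  (List.range n).foldl (fun (t : Int) (k : Nat) =>
    (List.range k).foldl (fun (t : Int) (j : Nat) =>
      if pvClose (((PySem.List.pyGet? vals (j : Int)).getD 0) ^^^
                  ((PySem.List.pyGet? vals (k : Int)).getD 0))
      then t + 1 else t) t) (0 : Int)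

-- ===== PRECONDITION & SPEC =====
-- one step of the parent chain, with Python's (possibly negative) list indexing
def pvChainStep (parent : List Int) (j : Int) : Int :=
  (PySem.List.pyGet? parent j).getD 0

-- Pre_ says the input is a well-formed instance: following parent pointers (Python
-- indexing, so forward and negative in-range indices are allowed) from every node
-- reaches node 0 within n steps, and every non-root node visited has an in-range
-- character that is 'a' (97) or above.  This is exactly where Python A returns
-- normally; on all other inputs A raises (RecursionError on chains that never reach 0,
-- IndexError on out-of-range indices, ValueError on 1 << negative for chars below 'a').
def Pre_countPalindromePaths (parent : List Int) (s : String) : Prop :=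
  ∀ k : Nat, k < parent.length →
    ∃ m : Nat, m ≤ parent.length ∧ (pvChainStep parent)^[m] (k : Int) = 0 ∧
      ∀ t : Nat, t < m →
        (pvChainStep parent)^[t] (k : Int) ≠ 0 ∧
        PySem.List.pyGet? parent ((pvChainStep parent)^[t] (k : Int)) ≠ none ∧
        PySem.Str.pyGet? s ((pvChainStep parent)^[t] (k : Int)) ≠ none ∧
        97 ≤ ((PySem.Str.pyGet? s ((pvChainStep parent)^[t] (k : Int))).getD 'a').toNat
instance (parent : List Int) (s : String) : Decidable (Pre_countPalindromePaths parent s) := by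
  unfold Pre_countPalindromePaths; infer_instance

def pvWitness_countPalindromePaths : List Int × String := ([0, 2, 0], "abc")

def Spec_countPalindromePaths (parent : List Int) (s : String) (out : Int) : Prop := out = countPalindromePaths_alt parent s
instance (parent : List Int) (s : String) (out : Int) : Decidable (Spec_countPalindromePaths parent s out) := by unfold Spec_countPalindromePaths; infer_instance

-- ===== CLAIM (what is proved, stated in full; the proofs are below) =====
def Claim_equal_countPalindromePaths : Prop := ∀ (parent : List Int) (s : String), Dom_countPalindromePaths parent s → Pre_countPalindromePaths parent s → Spec_countPalindromePaths parent s (countPalindromePaths parent s)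

-- ===== LEMMAS AND PROOFS =====

-- xor bookkeeping
theorem pv_xor_eq_comm (a b c : Nat) : a = b ^^^ c ↔ a ^^^ b = c := by
  constructor
  · rintro rfl; rw [Nat.xor_comm b c, Nat.xor_assoc, Nat.xor_self, Nat.xor_zero]
  · rintro rfl; rw [Nat.xor_comm a b, ← Nat.xor_assoc, Nat.xor_self, Nat.zero_xor]

theorem pv_shift_inj {i j : Nat} (h : 1 <<< i = 1 <<< j) : i = j := by
  simp only [Nat.one_shiftLeft] at h
  exact Nat.pow_right_injective (le_refl 2) h

-- B's walk accumulates exactly A's recursive xor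
theorem pv_walk_eq (parent : List Int) (s : List Char) :
    ∀ (f : Nat) (j : Int) (m : Nat), pvWalkB parent s f j m = m ^^^ pvGetValsA parent s f j := by
  intro f
  induction f with
  | zero => intro j m; simp [pvWalkB, pvGetValsA]
  | succ f ih =>
    intro j m
    simp only [pvWalkB, pvGetValsA]
    by_cases hj : j = 0
    · simp [hj]
    · rw [if_neg hj, if_neg hj, ih]
      rw [Nat.xor_assoc, Nat.xor_comm (pvBit s j)]

-- the dict component of A's fold is the plain counting fold
theorem pv_stepA_snd (v : List Nat) :
    ∀ (a : Int) (d : PySem.Dict Nat Int),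
      (v.foldl pvStepA (a, d)).2 = v.foldl (fun d x => d.insert x (d.getD x 0 + 1)) d := by
  induction v with
  | nil => intro a d; rfl
  | cons y v ih => intro a d; simp only [List.foldl_cons, pvStepA]; exact ih _ _

theorem pv_sum_map_add {α : Type} (l : List α) (f g : α → Int) :
    (l.map fun a => f a + g a).sum = (l.map f).sum + (l.map g).sum := by
  induction l with
  | nil => simp
  | cons a l ih => simp only [List.map_cons, List.sum_cons, ih]; ring

-- sum of indicators over a Nodup list = "any" indicator (uses injectivity of 1 <<< ·)
theorem pv_sum_indicator (d : Nat) :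
    ∀ (l : List Nat), l.Nodup →
      ((l.map fun i => if d = 1 <<< i then (1 : Int) else 0).sum
        = if l.any (fun i => d == 1 <<< i) then 1 else 0) := by
  intro l
  induction l with
  | nil => simp
  | cons a l ih =>
    intro hnd
    rcases List.nodup_cons.mp hnd with ⟨ha, hl⟩
    by_cases hd : d = 1 <<< a
    · have hz : ((l.map fun i => if d = 1 <<< i then (1 : Int) else 0).sum = 0) := by
        apply List.sum_eq_zero
        intro z hzm
        rcases List.mem_map.mp hzm with ⟨i, hi, rfl⟩
        have hne : d ≠ 1 <<< i := by
          intro h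
          have : a = i := pv_shift_inj (by rw [← hd]; exact h)
          exact ha (this ▸ hi)
        simp [hne]
      rw [List.map_cons, List.sum_cons, hz, if_pos hd]
      have hb : (d == 1 <<< a) = true := by simp [hd]
      simp [List.any_cons, hb]
    · have hb : (d == 1 <<< a) = false := by simp [hd]
      simp only [List.map_cons, List.sum_cons, List.any_cons, hb, Bool.false_or, if_neg hd,
        zero_add]
      exact ih hl

-- the scalar identity behind the two counting schemes
theorem pv_scalar (d : Nat) :
    (if pvClose d then (1 : Int) else 0)
      = (if d = 0 then 1 else 0)
        + ((List.range 26).map fun i => if d = 1 <<< i then (1 : Int) else 0).sum := by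
  rw [pv_sum_indicator d (List.range 26) (List.nodup_range)]
  by_cases h0 : d = 0
  · subst h0; decide
  · simp [pvClose, h0]

-- per-element: A's 27 dictionary counts = B's single closeness test
theorem pv_countP_close (x : Nat) :
    ∀ (u : List Nat),
      ((u.countP fun y => pvClose (y ^^^ x)) : Int)
        = (u.count x : Int)
          + ((List.range 26).map fun i => (u.count (x ^^^ 1 <<< i) : Int)).sum := by
  intro u
  induction u with
  | nil => simp
  | cons y u ih =>
    have hcnt : ∀ c : Nat, ((y :: u).count c : Int)
        = (u.count c : Int) + (if y = c then 1 else 0) := by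
      intro c
      rw [List.count_cons]
      by_cases h : y = c <;> simp [h]
    have hmap : ((List.range 26).map fun i => (((y :: u).count (x ^^^ 1 <<< i)) : Int))
        = (List.range 26).map fun i =>
            (u.count (x ^^^ 1 <<< i) : Int) + (if y = x ^^^ 1 <<< i then 1 else 0) := by
      exact List.map_congr_left (fun i _ => hcnt _)
    have h1 : (if y ^^^ x = 0 then (1 : Int) else 0) = (if y = x then 1 else 0) := by
      exact if_congr Nat.xor_eq_zero_iff rfl rfl
    have h2 : ((List.range 26).map fun i => if y ^^^ x = 1 <<< i then (1 : Int) else 0)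
        = (List.range 26).map fun i => if y = x ^^^ 1 <<< i then (1 : Int) else 0 := by
      refine List.map_congr_left (fun i _ => ?_)
      exact if_congr (pv_xor_eq_comm y x (1 <<< i)).symm rfl rfl
    have hy : (if pvClose (y ^^^ x) then (1 : Int) else 0)
        = (if y = x then 1 else 0)
          + ((List.range 26).map fun i => if y = x ^^^ 1 <<< i then (1 : Int) else 0).sum := by
      rw [pv_scalar (y ^^^ x), h1, h2]
    rw [List.countP_cons, hmap, pv_sum_map_add, hcnt x]
    push_cast
    rw [ih, hy]
    ring

-- (range u.length).map (u[.]) = u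
theorem pv_map_get (u : List Nat) :
    ((List.range u.length).map fun (j : Nat) => (PySem.List.pyGet? u (j : Int)).getD 0) = u := by
  apply List.ext_getElem
  · simp
  · intro i h1 h2
    simp [PySem.List.pyGet?_natCast, h2]

-- one outer iteration of B at k = u.length, over vals = u ++ [x]
theorem pv_inner_count (u : List Nat) (x : Nat) (t : Int) :
    ((List.range u.length).foldl (fun (t : Int) (j : Nat) =>
        if pvClose (((PySem.List.pyGet? (u ++ [x]) (j : Int)).getD 0) ^^^
                    ((PySem.List.pyGet? (u ++ [x]) ((u.length : Nat) : Int)).getD 0))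
        then t + 1 else t) t)
      = t + (u.countP fun y => pvClose (y ^^^ x) : Int) := by
  have hlast : (PySem.List.pyGet? (u ++ [x]) ((u.length : Nat) : Int)).getD 0 = x := by
    simp
  have hcongr : ∀ (t : Int) (j : Nat), j ∈ List.range u.length →
      (if pvClose (((PySem.List.pyGet? (u ++ [x]) (j : Int)).getD 0) ^^^
                   ((PySem.List.pyGet? (u ++ [x]) ((u.length : Nat) : Int)).getD 0))
       then t + 1 else t)
        = if pvClose (((PySem.List.pyGet? u (j : Int)).getD 0) ^^^ x) then t + 1 else t := by
    intro t j hj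
    have hj' : j < u.length := List.mem_range.mp hj
    rw [hlast]
    have he : (PySem.List.pyGet? (u ++ [x]) (j : Int)).getD 0
        = (PySem.List.pyGet? u (j : Int)).getD 0 := by
      simp [PySem.List.pyGet?_natCast, List.getElem?_append_left hj']
    rw [he]
  rw [PySem.List.foldl_congr_mem _ _ _ _ hcongr]
  rw [PySem.List.foldl_if_add_one]
  have hcp : (List.range u.length).countP
        (fun (j : Nat) => pvClose (((PySem.List.pyGet? u (j : Int)).getD 0) ^^^ x))
      = u.countP (fun y => pvClose (y ^^^ x)) := by
    conv_rhs => rw [← pv_map_get u]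
    rw [List.countP_map]
    rfl
  rw [hcp]

-- A's streaming count over v equals B's double loop over index pairs of v
theorem pv_count_eq (v : List Nat) :
    (v.foldl pvStepA (0, PySem.Dict.empty)).1
      = (List.range v.length).foldl (fun (t : Int) (k : Nat) =>
          (List.range k).foldl (fun (t : Int) (j : Nat) =>
            if pvClose (((PySem.List.pyGet? v (j : Int)).getD 0) ^^^
                        ((PySem.List.pyGet? v (k : Int)).getD 0))
            then t + 1 else t) t) (0 : Int) := by
  induction v using List.reverseRecOn with
  | nil => rfl
  | append_singleton u x ih =>
    -- A side
    rw [List.foldl_append]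
    have hsnd := pv_stepA_snd u 0 PySem.Dict.empty
    have hA : (List.foldl pvStepA (List.foldl pvStepA (0, PySem.Dict.empty) u) [x]).1
        = (List.foldl pvStepA (0, PySem.Dict.empty) u).1
          + ((u.count x : Int)
             + ((List.range 26).map fun i => (u.count (x ^^^ 1 <<< i) : Int)).sum) := by
      simp only [List.foldl_cons, List.foldl_nil, pvStepA]
      rw [PySem.List.foldl_add (g := fun i =>
        (List.foldl pvStepA (0, PySem.Dict.empty) u).2.getD (x ^^^ 1 <<< i) 0)]
      have hgetD : ∀ c : Nat,
          (List.foldl pvStepA (0, PySem.Dict.empty) u).2.getD c 0 = (u.count c : Int) := by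
        intro c
        rw [hsnd, PySem.Dict.getD_foldl_insert_add_one, PySem.Dict.getD_empty]
        simp
      rw [hgetD x]
      have hm : ((List.range 26).map fun i =>
          (List.foldl pvStepA (0, PySem.Dict.empty) u).2.getD (x ^^^ 1 <<< i) 0)
          = (List.range 26).map fun i => (u.count (x ^^^ 1 <<< i) : Int) :=
        List.map_congr_left (fun i _ => hgetD _)
      rw [hm]
      ring
    rw [hA, ih]
    -- B side: the first u.length outer iterations only read indices < u.length
    have houter : ∀ (t : Int) (k : Nat), k ∈ List.range u.length →
        ((List.range k).foldl (fun (t : Int) (j : Nat) =>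
            if pvClose (((PySem.List.pyGet? (u ++ [x]) (j : Int)).getD 0) ^^^
                        ((PySem.List.pyGet? (u ++ [x]) (k : Int)).getD 0))
            then t + 1 else t) t)
          = (List.range k).foldl (fun (t : Int) (j : Nat) =>
            if pvClose (((PySem.List.pyGet? u (j : Int)).getD 0) ^^^
                        ((PySem.List.pyGet? u (k : Int)).getD 0))
            then t + 1 else t) t := by
      intro t k hk
      have hk' : k < u.length := List.mem_range.mp hk
      refine PySem.List.foldl_congr_mem _ _ _ _ ?_
      intro t j hj
      have hj' : j < k := List.mem_range.mp hj
      have e1 : (PySem.List.pyGet? (u ++ [x]) (j : Int)).getD 0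
          = (PySem.List.pyGet? u (j : Int)).getD 0 := by
        simp [PySem.List.pyGet?_natCast, List.getElem?_append_left (lt_trans hj' hk')]
      have e2 : (PySem.List.pyGet? (u ++ [x]) (k : Int)).getD 0
          = (PySem.List.pyGet? u (k : Int)).getD 0 := by
        simp [PySem.List.pyGet?_natCast, List.getElem?_append_left hk']
      rw [e1, e2]
    have hOuterEq := PySem.List.foldl_congr_mem _ _ _ (0 : Int) houter
    conv_rhs => rw [show (u ++ [x]).length = u.length + 1 from by simp, List.range_succ,
      List.foldl_append, hOuterEq]
    simp only [List.foldl_cons, List.foldl_nil]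
    rw [pv_inner_count, pv_countP_close]

-- ===== VERDICT (by name: the statement is the Claim_ definition above) =====
theorem countPalindromePaths_spec : Claim_equal_countPalindromePaths := by
  intro parent s _hdom _hpre
  unfold Spec_countPalindromePaths
  simp only [countPalindromePaths, countPalindromePaths_alt]
  have hv : ((List.range parent.length).map fun (i : Nat) =>
        pvWalkB parent s.toList parent.length (i : Int) 0)
      = (List.range parent.length).map fun (i : Nat) =>
        pvGetValsA parent s.toList parent.length (i : Int) :=
    List.map_congr_left (fun i _ => by rw [pv_walk_eq, Nat.zero_xor])
  rw [hv]
  set v := (List.range parent.length).map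
    (fun (i : Nat) => pvGetValsA parent s.toList parent.length (i : Int)) with hvdef
  have hlen : parent.length = v.length := by rw [hvdef]; simp
  rw [hlen]
  exact pv_count_eq v
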